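-- pv_equiv track=rewrite | github.com/memfuse/memfuse | src/memfuse_core/rag/chunk/character.py | _find_optimal_break_point
-- ===== SOURCE A (Python) =====
-- def _find_optimal_break_point(text: str, max_length: int) -> int:
--     """Find the optimal break point for splitting text.
--
--     Tries to break at sentence boundaries, then word boundaries.
--
--     Args:
--         text: Text to find break point in
--         max_length: Maximum length to consider
--
--     Returns:
--         Optimal break point position
--     """
--     if len(text) <= max_length:
--         return len(text)
--
--     # Try to break at sentence boundary (. ! ?)
--     for i in range(max_length - 1, max_length // 2, -1):
--         if text[i] in '.!?':
--             return i + 1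
--
--     # Try to break at word boundary
--     for i in range(max_length - 1, max_length // 2, -1):
--         if text[i].isspace():
--             return i
--
--     # If no good break point found, use max_length
--     return max_length
-- ===== SOURCE B (Python) =====
-- def _find_optimal_break_point(text: str, max_length: int) -> int:
--     """Single backward pass: return just after the first sentence-ending
--     punctuation found; remember the first whitespace index seen as a fallback."""
--     if len(text) <= max_length:
--         return len(text)
--
--     word_break = None
--     for i in range(max_length - 1, max_length // 2, -1):
--         if text[i] in '.!?':
--             return i + 1
--         if word_break is None and text[i].isspace():
--             word_break = i
--
--     return word_break if word_break is not None else max_length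
-- ===== Notes on version B (the rewrite author's own statement) =====
-- stated objective: alternative
-- what changed: Replaces A's two sequential backward scans of the window (one for sentence punctuation, then a second full scan for whitespace) by a single backward pass that returns at the first '.!?' and remembers the first whitespace index seen as a fallback.
import Mathlib
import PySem

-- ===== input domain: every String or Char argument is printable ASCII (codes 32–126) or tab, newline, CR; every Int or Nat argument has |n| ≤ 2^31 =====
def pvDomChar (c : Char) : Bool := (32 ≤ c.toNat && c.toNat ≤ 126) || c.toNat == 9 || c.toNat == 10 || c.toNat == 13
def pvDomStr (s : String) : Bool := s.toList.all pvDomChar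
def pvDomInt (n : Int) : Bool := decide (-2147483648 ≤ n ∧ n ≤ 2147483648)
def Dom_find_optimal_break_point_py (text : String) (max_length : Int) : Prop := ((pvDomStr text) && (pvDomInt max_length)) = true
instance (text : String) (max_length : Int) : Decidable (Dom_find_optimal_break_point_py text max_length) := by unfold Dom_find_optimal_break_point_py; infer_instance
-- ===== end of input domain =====

-- B collapses A's two sequential backward scans into one backward pass that
-- remembers the first whitespace index as a fallback (objective: alternative, same cost).

-- text[i]; on every index either port scans the access is in range, so the
-- 'a' default of the none (IndexError) branch is unreachable.
def pvCharAt (cs : List Char) (i : Int) : Char :=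
  match PySem.List.pyGet? cs i with
  | some c => c
  | none => 'a'

-- ===== PORT A =====
-- first loop: for i in range(...): if text[i] in '.!?': return i + 1
def pvScanPunct (cs : List Char) : List Int → Option Int
  | [] => none
  | i :: rest =>
      if pvCharAt cs i = '.' ∨ pvCharAt cs i = '!' ∨ pvCharAt cs i = '?' then some (i + 1)
      else pvScanPunct cs rest

-- second loop: for i in range(...): if text[i].isspace(): return i
def pvScanSpace (cs : List Char) : List Int → Option Int
  | [] => none
  | i :: rest =>
      if PySem.Chars.isspace (pvCharAt cs i) = true then some i
      else pvScanSpace cs rest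

def find_optimal_break_point_py (text : String) (max_length : Int) : Int :=
  let cs := text.toList
  if PySem.Str.len text ≤ max_length then PySem.Str.len text
  else
    let r := PySem.List.pyRange (max_length - 1) (PySem.Int.floordiv max_length 2) (-1)
    match pvScanPunct cs r with
    | some v => v
    | none =>
        match pvScanSpace cs r with
        | some v => v
        | none => max_length

-- ===== PORT B =====
-- single backward pass; 'acc' is the remembered first whitespace index (word_break)
def pvScanOnce (cs : List Char) (maxl : Int) : List Int → Option Int → Int
  | [], acc => acc.getD maxl
  | i :: rest, acc =>
      let c := pvCharAt cs i
      if c = '.' ∨ c = '!' ∨ c = '?' then i + 1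
      else pvScanOnce cs maxl rest (if acc = none ∧ PySem.Chars.isspace c = true then some i else acc)

def find_optimal_break_point_py_alt (text : String) (max_length : Int) : Int :=
  let cs := text.toList
  if PySem.Str.len text ≤ max_length then PySem.Str.len text
  else
    pvScanOnce cs max_length
      (PySem.List.pyRange (max_length - 1) (PySem.Int.floordiv max_length 2) (-1)) none

-- ===== PRECONDITION & SPEC =====
def Spec_find_optimal_break_point_py (text : String) (max_length : Int) (out : Int) : Prop := out = find_optimal_break_point_py_alt text max_length
instance (text : String) (max_length : Int) (out : Int) : Decidable (Spec_find_optimal_break_point_py text max_length out) := by unfold Spec_find_optimal_break_point_py; infer_instance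

-- ===== CLAIM (what is proved, stated in full; the proofs are below) =====
def Claim_equal_find_optimal_break_point_py : Prop := ∀ (text : String) (max_length : Int), Dom_find_optimal_break_point_py text max_length → Spec_find_optimal_break_point_py text max_length (find_optimal_break_point_py text max_length)

-- ===== LEMMAS AND PROOFS =====
lemma pvScanOnce_eq (cs : List Char) (maxl : Int) :
    ∀ (l : List Int) (acc : Option Int),
      pvScanOnce cs maxl l acc =
        match pvScanPunct cs l with
        | some v => v
        | none => ((acc.orElse fun _ => pvScanSpace cs l).getD maxl) := by
  intro l
  induction l with
  | nil => intro acc; cases acc <;> simp [pvScanOnce, pvScanPunct, pvScanSpace, Option.orElse]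
  | cons i rest ih =>
      intro acc
      by_cases hp : pvCharAt cs i = '.' ∨ pvCharAt cs i = '!' ∨ pvCharAt cs i = '?'
      · simp [pvScanOnce, pvScanPunct, hp]
      · by_cases hs : PySem.Chars.isspace (pvCharAt cs i) = true
        · cases acc <;>
            simp [pvScanOnce, pvScanPunct, pvScanSpace, hp, hs, ih, Option.orElse]
        · cases acc <;>
            simp [pvScanOnce, pvScanPunct, pvScanSpace, hp, hs, ih, Option.orElse]

-- ===== VERDICT (by name: the statement is the Claim_ definition above) =====
theorem find_optimal_break_point_py_spec : Claim_equal_find_optimal_break_point_py := by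
  intro text max_length _
  unfold Spec_find_optimal_break_point_py find_optimal_break_point_py find_optimal_break_point_py_alt
  set r := PySem.List.pyRange (max_length - 1) (PySem.Int.floordiv max_length 2) (-1) with hr
  split_ifs with h
  · rfl
  · rw [pvScanOnce_eq]
    cases hp : pvScanPunct text.toList r with
    | some v => simp [hp]
    | none =>
        cases hs : pvScanSpace text.toList r with
        | some v => simp [hp, hs, Option.orElse]
        | none => simp [hp, hs, Option.orElse]
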